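-- pv_equiv track=rewrite | github.com/cshamrick/stsauth | sts_auth/utils.py | format_role_order
-- ===== SOURCE A (Python) =====
-- from typing import List, Optional, Mapping
--
-- def format_role_order(roles: List[Optional[str]]) -> List[Optional[str]]:
--     """Given roles, returns them in the format: role_arn,principal_arn.
--
--     The format of the attribute value should be role_arn,principal_arn
--     but lots of blogs list it as principal_arn,role_arn so let's reverse
--     them if needed.
--
--     Args:
--         roles: List of roles.
--
--     Returns:
--         List of roles in the format: role_arn,principal_arn
--     """
--     for role in roles:
--         chunks = role.split(",")  # type: ignore[union-attr]
--         if "saml-provider" in chunks[0]: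
--             _role = chunks[1] + "," + chunks[0]
--             index = roles.index(role)
--             roles.insert(index, _role)
--             roles.remove(role)
--     return roles
-- ===== SOURCE B (Python) =====
-- from typing import List, Optional
--
--
-- def _swap_if_needed(role):
--     chunks = role.split(",")
--     if "saml-provider" in chunks[0]:
--         return chunks[1] + "," + chunks[0]
--     return role
--
--
-- def format_role_order(roles: List[Optional[str]]) -> List[Optional[str]]:
--     """Given roles, returns them in the format: role_arn,principal_arn.
--
--     Single pass: each role whose first comma-chunk names the saml-provider
--     gets its first two chunks swapped; others are kept as-is.
--     (Returns a new list; the original implementation edits the list in place.)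
--     """
--     return [_swap_if_needed(role) for role in roles]
-- ===== Notes on version B (the rewrite author's own statement) =====
-- stated objective: simpler
-- what changed: replaced the in-place loop that edits the list with list.index/insert/remove by a single comprehension mapping every role to its swapped form, building a new list
import Mathlib
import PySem

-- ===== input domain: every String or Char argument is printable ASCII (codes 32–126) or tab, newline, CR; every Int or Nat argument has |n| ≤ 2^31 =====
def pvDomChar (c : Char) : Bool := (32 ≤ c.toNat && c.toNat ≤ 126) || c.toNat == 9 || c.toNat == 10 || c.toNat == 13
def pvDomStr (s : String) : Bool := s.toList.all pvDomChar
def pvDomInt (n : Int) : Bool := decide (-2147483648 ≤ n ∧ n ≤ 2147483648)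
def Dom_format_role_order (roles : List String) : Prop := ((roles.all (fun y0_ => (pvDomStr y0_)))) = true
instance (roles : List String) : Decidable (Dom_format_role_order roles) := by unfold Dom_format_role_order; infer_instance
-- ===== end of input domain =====

-- B replaces A's in-place index/insert/remove loop by a single map pass (simpler);
-- equivalence is about the RETURN value only — A mutates its argument in place, B does not.

-- ===== PORT A =====
-- role.split(",")  — split? is none only for an empty separator, so getD [] is exact here
def froChunks (role : String) : List String :=
  (PySem.Str.split? role ",").getD []

-- Python's `for role in roles` iterates by index over the live (mutated) list; insert+remove keep
-- the length constant, so fuel = initial length covers every iteration. Where Python raises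
-- IndexError (chunks[1] missing) the port returns the current list; Pre_ excludes those inputs.
def froLoop : Nat → Nat → List String → List String
  | 0, _, lst => lst
  | n + 1, i, lst =>
    match PySem.List.pyGet? lst (i : Int) with
    | none => lst          -- i ≥ len(roles): the for-loop ends
    | some role =>
      let chunks := froChunks role
      if PySem.Str.isIn "saml-provider" (PySem.List.pyGetD chunks 0 "") then
        match PySem.List.pyGet? chunks 1 with
        | none => lst      -- Python: IndexError (outside Pre_)
        | some c1 =>
          let _role := c1 ++ "," ++ PySem.List.pyGetD chunks 0 ""
          let idx := (PySem.List.index? lst role).getD 0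
          let lst2 := PySem.List.insert lst (idx : Int) _role
          let lst3 := (PySem.List.remove? lst2 role).getD lst2
          froLoop n (i + 1) lst3
      else froLoop n (i + 1) lst

def format_role_order (roles : List String) : List String :=
  froLoop roles.length 0 roles

-- ===== PORT B =====
-- port of Source B's helper _swap_if_needed (total via pyGetD; exact under Pre_, which rules out the
-- IndexError case where Source B raises like A)
def froSwapIfNeeded (role : String) : String :=
  let chunks := froChunks role
  if PySem.Str.isIn "saml-provider" (PySem.List.pyGetD chunks 0 "") then
    PySem.List.pyGetD chunks 1 "" ++ "," ++ PySem.List.pyGetD chunks 0 ""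
  else role

def format_role_order_alt (roles : List String) : List String :=
  roles.map froSwapIfNeeded

-- ===== PRECONDITION & SPEC =====
-- helpers for stating Pre_ (mirror of what the Python condition reads off a single role)
def froCond (role : String) : Bool :=
  PySem.Str.isIn "saml-provider" (PySem.List.pyGetD (froChunks role) 0 "")

-- Pre_ excludes (a) roles with "saml-provider" before the first comma but no comma at all, on which
-- both A and Source B raise IndexError, and (b) lists where one role's swapped form equals a DIFFERENT
-- later role of the list — a duplicate-style collision on which A's value-based index/insert/remove
-- rewrites whichever equal element comes first, an accident of in-place editing no caller specifies.
def Pre_format_role_order (roles : List String) : Prop :=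
  (∀ r ∈ roles, froCond r → 2 ≤ (froChunks r).length) ∧
  roles.Pairwise (fun a b => froCond a → froCond b → froSwapIfNeeded a ≠ a → froSwapIfNeeded a ≠ b)

instance (roles : List String) : Decidable (Pre_format_role_order roles) := by
  unfold Pre_format_role_order; infer_instance

def pvWitness_format_role_order : List String :=
  ["arn:aws:iam::1:saml-provider/x,arn:aws:iam::1:role/r", "plain"]

def Spec_format_role_order (roles : List String) (out : List String) : Prop :=
  out = format_role_order_alt roles
instance (roles : List String) (out : List String) : Decidable (Spec_format_role_order roles out) := by
  unfold Spec_format_role_order; infer_instance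

-- ===== CLAIM (what is proved, stated in full; the proofs are below) =====
def Claim_equal_format_role_order : Prop :=
  ∀ (roles : List String), Dom_format_role_order roles → Pre_format_role_order roles →
    Spec_format_role_order roles (format_role_order roles)

-- ===== LEMMAS AND PROOFS =====

lemma remove?_append_of_not_mem (p t : List String) (v : String) (hp : v ∉ p) :
    PySem.List.remove? (p ++ t) v = (PySem.List.remove? t v).map (p ++ ·) := by
  induction p with
  | nil => simp [Option.map_id']
  | cons x xs ih =>
    simp only [List.mem_cons, not_or] at hp
    rw [List.cons_append, PySem.List.remove?_cons_of_ne (xs ++ t) (Ne.symm hp.1), ih hp.2]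
    cases PySem.List.remove? t v <;> simp

lemma insert_idx_remove_self (lst : List String) (v : String) (hv : v ∈ lst) :
    (PySem.List.remove?
        (PySem.List.insert lst (((PySem.List.index? lst v).getD 0 : Nat) : Int) v) v).getD
      (PySem.List.insert lst (((PySem.List.index? lst v).getD 0 : Nat) : Int) v) = lst := by
  obtain ⟨k, hk⟩ := (PySem.List.index?_isSome_iff lst v).2 hv |> Option.isSome_iff_exists.mp
  obtain ⟨pre, suf, rfl, hlen, hnp⟩ := (PySem.List.index?_eq_some_iff _ v k).1 hk
  rw [hk]
  simp only [Option.getD_some]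
  subst hlen
  rw [PySem.List.insert_natCast _ _ _ (by simp), List.take_left, List.drop_left,
      remove?_append_of_not_mem _ _ _ hnp]
  simp

lemma froLoop_invariant (suf : List String) :
    ∀ (pre : List String),
      (∀ r ∈ suf, froCond r → 2 ≤ (froChunks r).length) →
      (∀ r ∈ suf, froCond r → froSwapIfNeeded r ≠ r → r ∉ pre) →
      suf.Pairwise (fun a b => froCond a → froCond b → froSwapIfNeeded a ≠ a → froSwapIfNeeded a ≠ b) →
      froLoop suf.length pre.length (pre ++ suf) = pre ++ suf.map froSwapIfNeeded := by
  induction suf with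
  | nil => intro pre _ _ _; simp [froLoop]
  | cons role suf ih =>
    intro pre h1 h2 h3
    rw [List.pairwise_cons] at h3
    simp only [List.length_cons, froLoop, PySem.List.pyGet?_append_length]
    by_cases hc : froCond role
    · -- condition true
      have hlen2 : 2 ≤ (froChunks role).length := h1 role (by simp) hc
      have hget1 : PySem.List.pyGet? (froChunks role) 1 =
          some (PySem.List.pyGetD (froChunks role) 1 "") := by
        have hl : (1 : Int) < ((froChunks role).length : Int) := by omega
        rw [PySem.List.pyGet?_eq_some_getElem _ (by norm_num) hl,
            PySem.List.pyGetD_eq_getElem _ _ (by norm_num) hl]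
      have hcond : PySem.Str.isIn "saml-provider"
          (PySem.List.pyGetD (froChunks role) 0 "") = true := hc
      have hswap : froSwapIfNeeded role =
          PySem.List.pyGetD (froChunks role) 1 "" ++ "," ++
            PySem.List.pyGetD (froChunks role) 0 "" := by
        simp only [froSwapIfNeeded, hcond, if_true]
      simp only [hcond, if_true, hget1, ← hswap]
      by_cases hfix : froSwapIfNeeded role = role
      · -- swapped form equals role: insert-then-remove is the identity
        rw [hfix, insert_idx_remove_self _ _ (by simp)]
        have := ih (pre ++ [role])
          (fun r hr h => h1 r (by simp [hr]) h)
          (fun r hr hcr hsr => by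
            simp only [List.mem_append, List.mem_singleton, not_or]
            exact ⟨h2 r (by simp [hr]) hcr hsr,
              fun heq => hsr (by rw [heq]; exact hfix)⟩) h3.2
        simpa [hfix] using this
      · -- swapped form differs: index? finds role right after pre
        have hnp : role ∉ pre := h2 role (by simp) hc hfix
        have hidx : PySem.List.index? (pre ++ role :: suf) role = some pre.length :=
          (PySem.List.index?_eq_some_iff _ _ _).2 ⟨pre, suf, rfl, rfl, hnp⟩
        rw [hidx]
        simp only [Option.getD_some]
        rw [PySem.List.insert_natCast _ _ _ (by simp), List.take_left, List.drop_left,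
            remove?_append_of_not_mem _ _ _ hnp,
            PySem.List.remove?_cons_of_ne _ hfix, PySem.List.remove?_cons_self]
        simp only [Option.map_some, Option.getD_some]
        have := ih (pre ++ [froSwapIfNeeded role])
          (fun r hr h => h1 r (by simp [hr]) h)
          (fun r hr hcr hsr => by
            simp only [List.mem_append, List.mem_singleton, not_or]
            exact ⟨h2 r (by simp [hr]) hcr hsr,
              fun heq => h3.1 r hr hc hcr hfix heq.symm⟩) h3.2
        rw [show pre ++ froSwapIfNeeded role :: suf = (pre ++ [froSwapIfNeeded role]) ++ suf by simp,
            show pre.length + 1 = (pre ++ [froSwapIfNeeded role]).length by simp] at *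
        simpa using this
    · -- condition false: role untouched
      have hcond : PySem.Str.isIn "saml-provider"
          (PySem.List.pyGetD (froChunks role) 0 "") = false := by
        simpa [froCond] using hc
      simp only [hcond, if_false, Bool.false_eq_true]
      have := ih (pre ++ [role])
        (fun r hr h => h1 r (by simp [hr]) h)
        (fun r hr hcr hsr => by
          simp only [List.mem_append, List.mem_singleton, not_or]
          refine ⟨h2 r (by simp [hr]) hcr hsr, fun heq => ?_⟩
          subst heq; exact hc hcr) h3.2
      have hstep : froSwapIfNeeded role = role := by
        simp only [froSwapIfNeeded, hcond]; simp
      simpa [hstep] using this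

-- ===== VERDICT (by name: the statement is the Claim_ definition above) =====
theorem format_role_order_spec : Claim_equal_format_role_order := by
  intro roles _ hpre
  unfold Spec_format_role_order format_role_order format_role_order_alt
  have h := froLoop_invariant roles [] hpre.1 (by simp) hpre.2
  simpa using h
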